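-- pv_equiv track=rewrite | github.com/Emicy963/nerdacademy | backend/apps/institutions/services.py | _next_seq
-- ===== SOURCE A (Python) =====
-- def _next_seq(pattern: str, existing_codes) -> int:
--     """
--     Finds the lowest unused sequence number given a list of existing codes
--     that start with *pattern*. Handles gaps caused by deletions.
--     """
--     used = set()
--     suffix_len = 4  # always 4-digit sequence
--     for code in existing_codes:
--         tail = code[len(pattern):]
--         if tail.isdigit() and len(tail) == suffix_len:
--             used.add(int(tail))
--     seq = 1
--     while seq in used:
--         seq += 1
--     return seq
-- ===== SOURCE B (Python) =====
-- def _next_seq(pattern: str, existing_codes) -> int: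
--     vals = []
--     for code in existing_codes:
--         tail = code[len(pattern):]
--         if tail.isdigit() and len(tail) == 4:
--             vals.append(int(tail))
--     vals.sort()
--     expected = 1
--     for v in vals:
--         if v == expected:
--             expected += 1
--         elif v > expected:
--             break
--     return expected
-- ===== Notes on version B (the rewrite author's own statement) =====
-- stated objective: alternative
-- what changed: Replaces A's set plus upward membership probing (while seq in used) with a sort of the collected suffix values followed by a single ordered scan that finds the first gap, skipping duplicates and breaking at the first value above the expected counter.
import Mathlib
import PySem

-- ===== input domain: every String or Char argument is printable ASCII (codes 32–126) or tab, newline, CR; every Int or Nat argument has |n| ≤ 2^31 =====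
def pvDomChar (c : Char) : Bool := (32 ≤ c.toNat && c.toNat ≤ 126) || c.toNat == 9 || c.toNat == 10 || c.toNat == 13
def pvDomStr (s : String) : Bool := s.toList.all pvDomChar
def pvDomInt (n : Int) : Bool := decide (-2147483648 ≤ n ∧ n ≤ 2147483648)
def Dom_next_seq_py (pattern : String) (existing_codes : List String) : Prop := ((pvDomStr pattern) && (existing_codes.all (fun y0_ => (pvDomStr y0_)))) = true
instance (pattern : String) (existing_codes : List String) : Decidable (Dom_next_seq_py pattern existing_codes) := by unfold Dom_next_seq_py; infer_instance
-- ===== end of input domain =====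

-- B replaces A's set + upward membership probing with sort-then-ordered-scan for the first gap (alternative algorithm, similar cost).

-- ===== PORT A =====
-- 'while seq in used: seq += 1' with a fuel guard (|used|+1 steps always suffice by pigeonhole; the guard only makes the loop total)
def nextSeqWhile (used : PySem.Set Int) : Nat → Int → Int
  | 0, seq => seq
  | fuel + 1, seq => if PySem.Set.contains used seq then nextSeqWhile used fuel (seq + 1) else seq

def next_seq_py (pattern : String) (existing_codes : List String) : Int :=
  let used : PySem.Set Int := existing_codes.foldl (fun used code =>
    let tail := PySem.Str.slice code (some (PySem.Str.len pattern)) none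
    if PySem.Str.strIsdigit tail && (PySem.Str.len tail == 4) then
      -- int(tail): isdigit guarantees the parse succeeds, so the default is never used
      PySem.Set.add used ((PySem.Int.ofStr? tail).getD 0)
    else used) PySem.Set.empty
  nextSeqWhile used (used.length + 1) 1

-- ===== PORT B =====
-- the for-loop with break: consume the sorted values in order
def nextSeqScan : List Int → Int → Int
  | [], expected => expected
  | v :: rest, expected =>
    if v = expected then nextSeqScan rest (expected + 1)
    else if v > expected then expected
    else nextSeqScan rest expected

def next_seq_py_alt (pattern : String) (existing_codes : List String) : Int :=
  let vals : List Int := existing_codes.foldl (fun vals code =>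
    let tail := PySem.Str.slice code (some (PySem.Str.len pattern)) none
    if PySem.Str.strIsdigit tail && (PySem.Str.len tail == 4) then
      vals ++ [(PySem.Int.ofStr? tail).getD 0]
    else vals) []
  nextSeqScan (PySem.List.sorted vals (fun x => x) false) 1

-- ===== PRECONDITION & SPEC =====
def Spec_next_seq_py (pattern : String) (existing_codes : List String) (out : Int) : Prop := out = next_seq_py_alt pattern existing_codes
instance (pattern : String) (existing_codes : List String) (out : Int) : Decidable (Spec_next_seq_py pattern existing_codes out) := by unfold Spec_next_seq_py; infer_instance

-- ===== CLAIM (what is proved, stated in full; the proofs are below) =====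
def Claim_equal_next_seq_py : Prop := ∀ (pattern : String) (existing_codes : List String), Dom_next_seq_py pattern existing_codes → Spec_next_seq_py pattern existing_codes (next_seq_py pattern existing_codes)

-- ===== LEMMAS AND PROOFS =====

-- the value a single code contributes (if any)
def suffixVal (pattern code : String) : Option Int :=
  if PySem.Str.strIsdigit (PySem.Str.slice code (some (PySem.Str.len pattern)) none)
      && (PySem.Str.len (PySem.Str.slice code (some (PySem.Str.len pattern)) none) == 4) then
    some ((PySem.Int.ofStr? (PySem.Str.slice code (some (PySem.Str.len pattern)) none)).getD 0)
  else none

theorem stepA_eq (pattern : String) :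
    (fun (used : PySem.Set Int) (code : String) =>
      let tail := PySem.Str.slice code (some (PySem.Str.len pattern)) none
      if PySem.Str.strIsdigit tail && (PySem.Str.len tail == 4) then
        PySem.Set.add used ((PySem.Int.ofStr? tail).getD 0)
      else used)
    = fun used code => match suffixVal pattern code with
      | some v => PySem.Set.add used v
      | none => used := by
  funext used code
  show (if PySem.Str.strIsdigit (PySem.Str.slice code (some (PySem.Str.len pattern)) none)
      && (PySem.Str.len (PySem.Str.slice code (some (PySem.Str.len pattern)) none) == 4) then
      PySem.Set.add used ((PySem.Int.ofStr? (PySem.Str.slice code (some (PySem.Str.len pattern)) none)).getD 0)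
    else used) = _
  rw [suffixVal]
  split <;> rfl

theorem stepB_eq (pattern : String) :
    (fun (vals : List Int) (code : String) =>
      let tail := PySem.Str.slice code (some (PySem.Str.len pattern)) none
      if PySem.Str.strIsdigit tail && (PySem.Str.len tail == 4) then
        vals ++ [(PySem.Int.ofStr? tail).getD 0]
      else vals)
    = fun vals code => match suffixVal pattern code with
      | some v => vals ++ [v]
      | none => vals := by
  funext vals code
  show (if PySem.Str.strIsdigit (PySem.Str.slice code (some (PySem.Str.len pattern)) none)
      && (PySem.Str.len (PySem.Str.slice code (some (PySem.Str.len pattern)) none) == 4) then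
      vals ++ [(PySem.Int.ofStr? (PySem.Str.slice code (some (PySem.Str.len pattern)) none)).getD 0]
    else vals) = _
  rw [suffixVal]
  split <;> rfl

-- A's accumulation: membership and nodup
theorem memA (pattern : String) (codes : List String) (s : PySem.Set Int) (x : Int) :
    x ∈ codes.foldl (fun used code => match suffixVal pattern code with
        | some v => PySem.Set.add used v
        | none => used) s
      ↔ x ∈ s ∨ x ∈ codes.filterMap (suffixVal pattern) := by
  induction codes generalizing s with
  | nil => simp
  | cons c cs ih =>
    simp only [List.foldl_cons, List.filterMap_cons]
    cases h : suffixVal pattern c with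
    | none => clear h; simp [ih]
    | some v =>
      clear h
      simp only [ih, PySem.Set.mem_add, List.mem_cons]
      exact or_assoc

-- B's accumulation is the filterMap
theorem valsB (pattern : String) (codes : List String) (acc : List Int) :
    codes.foldl (fun vals code => match suffixVal pattern code with
        | some v => vals ++ [v]
        | none => vals) acc
      = acc ++ codes.filterMap (suffixVal pattern) := by
  induction codes generalizing acc with
  | nil => simp
  | cons c cs ih =>
    simp only [List.foldl_cons, List.filterMap_cons]
    cases h : suffixVal pattern c with
    | none => simp [ih]
    | some v => simp [ih]

-- mex characterisation of B's scan over a sorted list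
theorem scan_spec (L : List Int) (hL : L.Pairwise (· ≤ ·)) (e : Int) :
    e ≤ nextSeqScan L e ∧ nextSeqScan L e ∉ L ∧
      ∀ k, e ≤ k → k < nextSeqScan L e → k ∈ L := by
  induction L generalizing e with
  | nil => simp [nextSeqScan]
  | cons v rest ih =>
    have hv : ∀ y ∈ rest, v ≤ y := (List.pairwise_cons.mp hL).1
    have hrest := ih (List.pairwise_cons.mp hL).2
    by_cases h1 : v = e
    · obtain ⟨hle, hnm, hall⟩ := hrest (e + 1)
      refine ⟨?_, ?_, ?_⟩
      · rw [nextSeqScan, if_pos h1]; omega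
      · rw [nextSeqScan, if_pos h1]
        intro hmem
        rcases List.mem_cons.mp hmem with heq | hmem2
        · omega
        · exact hnm hmem2
      · intro k hk1 hk2
        rw [nextSeqScan, if_pos h1] at hk2
        rcases eq_or_lt_of_le hk1 with rfl | hk1'
        · simp [h1]
        · exact List.mem_cons_of_mem _ (hall k (by omega) hk2)
    · by_cases h2 : v > e
      · refine ⟨?_, ?_, ?_⟩
        · rw [nextSeqScan, if_neg h1, if_pos h2]
        · rw [nextSeqScan, if_neg h1, if_pos h2]
          intro hmem
          rcases List.mem_cons.mp hmem with heq | hmem2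
          · omega
          · have := hv e hmem2; omega
        · intro k hk1 hk2
          rw [nextSeqScan, if_neg h1, if_pos h2] at hk2
          omega
      · obtain ⟨hle, hnm, hall⟩ := hrest e
        refine ⟨?_, ?_, ?_⟩
        · rw [nextSeqScan, if_neg h1, if_neg h2]; exact hle
        · rw [nextSeqScan, if_neg h1, if_neg h2]
          intro hmem
          rcases List.mem_cons.mp hmem with heq | hmem2
          · omega
          · exact hnm hmem2
        · intro k hk1 hk2
          rw [nextSeqScan, if_neg h1, if_neg h2] at hk2
          exact List.mem_cons_of_mem _ (hall k hk1 hk2)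

-- mex characterisation of A's while-loop, given enough fuel
theorem while_spec (used : PySem.Set Int) (fuel : Nat) :
    ∀ seq : Int, (∃ j : Nat, j < fuel ∧ (seq + j) ∉ used) →
    seq ≤ nextSeqWhile used fuel seq ∧ nextSeqWhile used fuel seq ∉ used ∧
      ∀ k, seq ≤ k → k < nextSeqWhile used fuel seq → k ∈ used := by
  induction fuel with
  | zero => intro seq h; omega
  | succ n ih =>
    intro seq h
    cases hc : PySem.Set.contains used seq with
    | true =>
      have hm : seq ∈ used := (PySem.Set.contains_iff used seq).mp hc
      obtain ⟨j, hj, hnot⟩ := h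
      have hj0 : j ≠ 0 := by rintro rfl; simp only [Nat.cast_zero, add_zero] at hnot; exact hnot hm
      obtain ⟨hle, hnm, hall⟩ := ih (seq + 1) ⟨j - 1, by omega, by
        have he : seq + 1 + (↑(j - 1) : Int) = seq + j := by omega
        rwa [he]⟩
      refine ⟨?_, ?_, ?_⟩
      · rw [nextSeqWhile, if_pos hc]; omega
      · rw [nextSeqWhile, if_pos hc]; exact hnm
      · intro k hk1 hk2
        rw [nextSeqWhile, if_pos hc] at hk2
        rcases eq_or_lt_of_le hk1 with rfl | hk1'
        · exact hm
        · exact hall k (by omega) hk2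
    | false =>
      have hm : seq ∉ used := fun hmem => by
        rw [(PySem.Set.contains_iff used seq).mpr hmem] at hc
        cases hc
      refine ⟨?_, ?_, ?_⟩
      · rw [nextSeqWhile, hc, if_neg (by decide)]
      · rw [nextSeqWhile, hc, if_neg (by decide)]; exact hm
      · intro k hk1 hk2
        rw [nextSeqWhile, hc, if_neg (by decide)] at hk2
        omega

-- pigeonhole: some value in 1 .. |used|+1 is missing from any list of that length
theorem fuel_enough (used : PySem.Set Int) :
    ∃ j : Nat, j < used.length + 1 ∧ ((1 : Int) + j) ∉ used := by
  by_contra hc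
  push Not at hc
  have hall : ∀ j : Nat, j < used.length + 1 → ((1 : Int) + j) ∈ used := hc
  have hsub : (List.range (used.length + 1)).map (fun j : Nat => (1 : Int) + j) ⊆ used := by
    intro x hx
    simp only [List.mem_map, List.mem_range] at hx
    obtain ⟨j, hj, rfl⟩ := hx
    exact hall j hj
  have hnd2 : ((List.range (used.length + 1)).map (fun j : Nat => (1 : Int) + j)).Nodup := by
    refine List.Nodup.map ?_ List.nodup_range
    intro a b hab
    simp only at hab
    omega
  have hle := (List.subperm_of_subset hnd2 hsub).length_le
  rw [List.length_map, List.length_range] at hle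
  omega

-- uniqueness of the mex
theorem mex_unique (P : Int → Prop) (r₁ r₂ : Int)
    (h₁ : 1 ≤ r₁ ∧ ¬ P r₁ ∧ ∀ k, 1 ≤ k → k < r₁ → P k)
    (h₂ : 1 ≤ r₂ ∧ ¬ P r₂ ∧ ∀ k, 1 ≤ k → k < r₂ → P k) : r₁ = r₂ := by
  rcases lt_trichotomy r₁ r₂ with h | h | h
  · exact absurd (h₂.2.2 r₁ h₁.1 h) h₁.2.1
  · exact h
  · exact absurd (h₁.2.2 r₂ h₂.1 h) h₂.2.1

-- ===== VERDICT (by name: the statement is the Claim_ definition above) =====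
theorem next_seq_py_spec : Claim_equal_next_seq_py := by
  intro pattern codes _
  unfold Spec_next_seq_py next_seq_py next_seq_py_alt
  rw [stepA_eq, stepB_eq, valsB]
  simp only [List.nil_append]
  set used := codes.foldl (fun used code => match suffixVal pattern code with
      | some v => PySem.Set.add used v
      | none => used) PySem.Set.empty with hused
  have hmemA : ∀ x : Int, x ∈ used ↔ x ∈ codes.filterMap (suffixVal pattern) := by
    intro x
    rw [hused, memA]
    simp [PySem.Set.empty]
  set L := PySem.List.sorted (codes.filterMap (suffixVal pattern)) (fun x => x) false with hL
  have hmemL : ∀ x : Int, x ∈ L ↔ x ∈ codes.filterMap (suffixVal pattern) := fun x =>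
    PySem.List.mem_sorted (codes.filterMap (suffixVal pattern)) (fun x => x) false x
  have hpw : L.Pairwise (· ≤ ·) :=
    PySem.List.sorted_pairwise (codes.filterMap (suffixVal pattern)) (fun x : Int => x)
  have hA := while_spec used (used.length + 1) 1 (fuel_enough used)
  have hB := scan_spec L hpw 1
  exact mex_unique (fun k => k ∈ codes.filterMap (suffixVal pattern)) _ _
    ⟨hA.1, fun h => hA.2.1 ((hmemA _).mpr h), fun k hk1 hk2 => (hmemA k).mp (hA.2.2 k hk1 hk2)⟩
    ⟨hB.1, fun h => hB.2.1 ((hmemL _).mpr h), fun k hk1 hk2 => (hmemL k).mp (hB.2.2 k hk1 hk2)⟩
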